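-- pv_equiv track=rewrite | github.com/ForceMind/AI-Driven-Slot-Game-Demo | backend/game_logic.py | _check_line_match
-- ===== SOURCE A (Python) =====
-- from typing import List, Dict, Tuple, Optional, Any
--
-- def _check_line_match(line: List[str]) -> Tuple[int, str]:
--     """
--     Returns (count, symbol_id) for the longest left-to-right match.
--     ID "10" is WILD.
--     """
--     if not line:
--         return 0, ""
--
--     first_symbol = line[0]
--     match_symbol_id = first_symbol
--
--     # Identify the target symbol for the line
--     if first_symbol == "10": # WILD
--         match_symbol_id = "10"
--         for s in line:
--             if s != "10":
--                 match_symbol_id = s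
--                 break
--         if match_symbol_id == "10":
--             match_symbol_id = "1" # All Wilds pay as H1
--
--     count = 0
--     for s in line:
--         if s == match_symbol_id or s == "10":
--             count += 1
--         else:
--             break
--
--     return count, match_symbol_id
-- ===== SOURCE B (Python) =====
-- def _check_line_match(line):
--     """Single left-to-right pass: track target (first non-wild seen) and count."""
--     count = 0
--     target = None
--     for s in line:
--         if s == "10":
--             count += 1
--         elif target is None:
--             target = s
--             count += 1
--         elif s == target:
--             count += 1
--         else:
--             break
--     if not line:
--         return 0, ""
--     if target is None:
--         target = "1"
--     return count, target
-- ===== Notes on version B (the rewrite author's own statement) =====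
-- stated objective: simpler
-- what changed: Replaced A's two separate scans (one to find the first non-wild symbol, one to count the matching prefix) with a single left-to-right pass maintaining (count, target).
import Mathlib
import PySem

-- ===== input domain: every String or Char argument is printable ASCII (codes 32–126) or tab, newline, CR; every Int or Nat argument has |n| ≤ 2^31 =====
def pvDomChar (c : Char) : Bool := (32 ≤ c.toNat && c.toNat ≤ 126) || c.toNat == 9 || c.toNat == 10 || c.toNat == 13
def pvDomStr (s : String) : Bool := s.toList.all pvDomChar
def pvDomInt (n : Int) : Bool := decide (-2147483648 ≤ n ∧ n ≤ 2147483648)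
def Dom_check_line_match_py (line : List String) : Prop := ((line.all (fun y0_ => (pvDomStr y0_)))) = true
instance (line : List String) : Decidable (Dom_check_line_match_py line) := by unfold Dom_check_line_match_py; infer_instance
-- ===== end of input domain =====

-- B replaces A's two scans with one left-to-right pass over the line (same return value; same cost).
-- ===== PORT A =====
-- for s in line: if s != "10": match_symbol_id = s; break   (starting from "10")
def pvFindNonWild : List String → String
  | [] => "10"
  | s :: rest => if s ≠ "10" then s else pvFindNonWild rest

-- count = 0; for s in line: if s == msid or s == "10": count += 1 else: break
def pvCountA : List String → String → Int
  | [], _ => 0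
  | s :: rest, msid => if s = msid ∨ s = "10" then 1 + pvCountA rest msid else 0

def check_line_match_py (line : List String) : Int × String :=
  match line with
  | [] => (0, "")
  | first :: _ =>
    let match_symbol_id :=
      if first = "10" then
        let m := pvFindNonWild line
        if m = "10" then "1" else m
      else first
    (pvCountA line match_symbol_id, match_symbol_id)

-- ===== PORT B =====
-- the single pass of Source B: (count, target) state, break on mismatch
def pvAltLoop : List String → Option String → Int → Int × Option String
  | [], target, count => (count, target)
  | s :: rest, target, count =>
    if s = "10" then pvAltLoop rest target (count + 1)
    else match target with
      | none => pvAltLoop rest (some s) (count + 1)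
      | some t => if s = t then pvAltLoop rest target (count + 1) else (count, target)

def check_line_match_py_alt (line : List String) : Int × String :=
  let r := pvAltLoop line none 0
  if line = [] then (0, "")
  else (r.1, r.2.getD "1")

-- ===== PRECONDITION & SPEC =====
def Spec_check_line_match_py (line : List String) (out : Int × String) : Prop := out = check_line_match_py_alt line
instance (line : List String) (out : Int × String) : Decidable (Spec_check_line_match_py line out) := by unfold Spec_check_line_match_py; infer_instance

-- ===== CLAIM (what is proved, stated in full; the proofs are below) =====
def Claim_equal_check_line_match_py : Prop := ∀ (line : List String), Dom_check_line_match_py line → Spec_check_line_match_py line (check_line_match_py line)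

-- ===== LEMMAS AND PROOFS =====

-- ===== VERDICT (by name: the statement is the Claim_ definition above) =====
theorem altLoop_some (xs : List String) (t : String) (c : Int) :
    pvAltLoop xs (some t) c = (c + pvCountA xs t, some t) := by
  induction xs generalizing c with
  | nil => simp [pvAltLoop, pvCountA]
  | cons s rest ih =>
    by_cases h10 : s = "10"
    · simp [pvAltLoop, pvCountA, h10, ih]; ring
    · by_cases ht : s = t
      · simp [pvAltLoop, pvCountA, ht, ih]; ring
      · simp [pvAltLoop, pvCountA, h10, ht]

theorem altLoop_none (xs : List String) (c : Int) :
    pvAltLoop xs none c = (c + pvCountA xs (pvFindNonWild xs),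
      if pvFindNonWild xs = "10" then none else some (pvFindNonWild xs)) := by
  induction xs generalizing c with
  | nil => simp [pvAltLoop, pvCountA, pvFindNonWild]
  | cons s rest ih =>
    by_cases h10 : s = "10"
    · simp only [pvAltLoop, pvFindNonWild, pvCountA, h10, if_pos, ne_eq,
        not_true_eq_false, if_false]
      rw [ih]
      simp
      ring
    · simp [pvAltLoop, pvFindNonWild, pvCountA, h10, altLoop_some]
      ring

theorem findNonWild_wild {xs : List String} (h : pvFindNonWild xs = "10") :
    ∀ s ∈ xs, s = "10" := by
  induction xs with
  | nil => simp
  | cons a rest ih =>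
    by_cases ha : a = "10"
    · simp only [pvFindNonWild, ha, ne_eq, not_true_eq_false, ite_false] at h
      intro s hs
      rcases List.mem_cons.mp hs with h1 | h2
      · exact h1.trans ha
      · exact ih h s h2
    · simp [pvFindNonWild, ha] at h

theorem countA_allwild {xs : List String} (h : ∀ s ∈ xs, s = "10") (t : String) :
    pvCountA xs t = (xs.length : Int) := by
  induction xs with
  | nil => simp [pvCountA]
  | cons a rest ih =>
    have ha : a = "10" := h a (List.mem_cons_self)
    simp [pvCountA, ha, ih (fun s hs => h s (List.mem_cons_of_mem _ hs))]
    ring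

-- ===== VERDICT =====
theorem check_line_match_py_spec : Claim_equal_check_line_match_py := by
  intro line _
  unfold Spec_check_line_match_py check_line_match_py check_line_match_py_alt
  match line with
  | [] => simp
  | first :: rest =>
    simp only [List.cons_ne_nil, if_false]
    by_cases h10 : first = "10"
    · subst h10
      rw [altLoop_none]
      by_cases hall : pvFindNonWild ("10" :: rest) = "10"
      · have hw := findNonWild_wild hall
        simp [hall, countA_allwild hw]
      · simp [hall]
    · have hfw : pvFindNonWild (first :: rest) = first := by
        simp [pvFindNonWild, h10]
      simp only [pvAltLoop, h10, ite_false]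
      rw [altLoop_some]
      simp [pvCountA, h10]
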